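-- pv_equiv track=rewrite | github.com/absognety/Algorithms | Coding-Challeges/pairwise_offset.py | pairwise_offset
-- ===== SOURCE A (Python) =====
-- def pairwise_offset(sequence, fillvalue, offset):
--     if offset == 0:
--         output = zip(sequence,sequence)
--         return list(output)
--     sequence2 = sequence1 = sequence.copy()
--     for i in range(offset):
--         sequence1 = sequence1 + [fillvalue]
--         sequence2 = [fillvalue] + sequence2
--     return list(zip(sequence1,sequence2))
-- ===== SOURCE B (Python) =====
-- def pairwise_offset(sequence, fillvalue, offset):
--     n = len(sequence)
--     o = offset if offset > 0 else 0
--     return [(sequence[i] if i < n else fillvalue,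
--              fillvalue if i < o else sequence[i - o])
--             for i in range(n + o)]
-- ===== Notes on version B (the rewrite author's own statement) =====
-- stated objective: simpler
-- what changed: Replaces the loop that rebuilds two padded list copies (and the separate offset==0 branch) with a single index-based comprehension over range(n + max(offset,0)) that reads each element directly.
import Mathlib
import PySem

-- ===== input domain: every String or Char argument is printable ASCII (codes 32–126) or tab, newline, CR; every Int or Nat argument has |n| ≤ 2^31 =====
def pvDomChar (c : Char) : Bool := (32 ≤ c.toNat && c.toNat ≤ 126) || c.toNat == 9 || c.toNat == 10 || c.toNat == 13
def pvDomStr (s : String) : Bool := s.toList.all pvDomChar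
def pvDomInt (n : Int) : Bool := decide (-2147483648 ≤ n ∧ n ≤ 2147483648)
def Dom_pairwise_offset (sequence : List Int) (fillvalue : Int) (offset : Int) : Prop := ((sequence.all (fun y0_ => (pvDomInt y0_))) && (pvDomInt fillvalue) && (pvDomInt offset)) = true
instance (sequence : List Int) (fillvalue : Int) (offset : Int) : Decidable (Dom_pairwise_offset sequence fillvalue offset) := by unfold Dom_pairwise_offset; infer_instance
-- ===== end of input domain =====

-- B replaces A's padded-copies-then-zip construction (and its separate offset==0 branch) by one index-based pass: simpler.


-- ===== PORT A =====
def pairwise_offset (sequence : List Int) (fillvalue : Int) (offset : Int) : List (Int × Int) :=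
  if offset == 0 then
    sequence.zip sequence
  else
    -- for i in range(offset): sequence1 += [fillvalue]; sequence2 = [fillvalue] + sequence2
    let p := (PySem.List.pyRange 0 offset 1).foldl
      (fun (s : List Int × List Int) _ => (s.1 ++ [fillvalue], fillvalue :: s.2))
      (sequence, sequence)
    p.1.zip p.2

-- ===== PORT B =====
def pairwise_offset_alt (sequence : List Int) (fillvalue : Int) (offset : Int) : List (Int × Int) :=
  let n := sequence.length
  let o := (if offset > 0 then offset else 0).toNat
  (List.range (n + o)).map fun i =>
    ((if i < n then sequence.getD i 0 else fillvalue),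
     (if i < o then fillvalue else sequence.getD (i - o) 0))

-- ===== PRECONDITION & SPEC =====
def Spec_pairwise_offset (sequence : List Int) (fillvalue : Int) (offset : Int) (out : List (Int × Int)) : Prop := out = pairwise_offset_alt sequence fillvalue offset
instance (sequence : List Int) (fillvalue : Int) (offset : Int) (out : List (Int × Int)) : Decidable (Spec_pairwise_offset sequence fillvalue offset out) := by unfold Spec_pairwise_offset; infer_instance

-- ===== CLAIM (what is proved, stated in full; the proofs are below) =====
def Claim_equal_pairwise_offset : Prop := ∀ (sequence : List Int) (fillvalue : Int) (offset : Int), Dom_pairwise_offset sequence fillvalue offset → Spec_pairwise_offset sequence fillvalue offset (pairwise_offset sequence fillvalue offset)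

-- ===== LEMMAS AND PROOFS =====

-- A's loop builds (sequence ++ replicate k f, replicate k f ++ sequence), k = number of iterations.
theorem po_foldl (f : Int) (l : List Int) (s1 s2 : List Int) :
    l.foldl (fun (s : List Int × List Int) _ => (s.1 ++ [f], f :: s.2)) (s1, s2)
      = (s1 ++ List.replicate l.length f, List.replicate l.length f ++ s2) := by
  induction l generalizing s1 s2 with
  | nil => simp
  | cons a t ih =>
    have hrep : ∀ (n : Nat) (s2 : List Int),
        List.replicate n f ++ f :: s2 = f :: (List.replicate n f ++ s2) := by
      intro n s2
      induction n with
      | zero => simp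
      | succ m ihm => simp [List.replicate_succ, ihm]
    simp [List.foldl_cons, ih, List.replicate_succ, hrep]

-- zip of the padded copies equals B's index formula.
theorem po_zip (seq : List Int) (f : Int) (k : Nat) :
    (seq ++ List.replicate k f).zip (List.replicate k f ++ seq)
      = (List.range (seq.length + k)).map (fun i =>
          ((if i < seq.length then seq.getD i 0 else f),
           (if i < k then f else seq.getD (i - k) 0))) := by
  apply List.ext_getElem
  · simp [Nat.add_comm]
  · intro i h1 h2
    simp only [List.length_zip, List.length_append, List.length_replicate] at h1
    have hi : i < seq.length + k := by omega
    simp only [List.getElem_zip, List.getElem_map, List.getElem_range]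
    rw [Prod.mk.injEq]
    refine ⟨?_, ?_⟩
    · by_cases h : i < seq.length
      · simp [h, List.getD_eq_getElem?_getD, List.getElem?_eq_getElem]
      · simp [List.getElem_append, h]
    · by_cases h : i < k
      · simp [List.getElem_append, h]
      · have hik : i - k < seq.length := by omega
        simp [List.getElem_append, h, List.getD_eq_getElem?_getD,
              List.getElem?_eq_getElem hik, Nat.not_lt.mp h]

-- ===== VERDICT (by name: the statement is the Claim_ definition above) =====
theorem pairwise_offset_spec : Claim_equal_pairwise_offset := by
  intro sequence fillvalue offset _
  unfold Spec_pairwise_offset pairwise_offset pairwise_offset_alt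
  rcases lt_trichotomy offset 0 with hlt | heq | hgt
  · -- negative offset: range is empty, both sides zip(seq, seq)
    have hne : (offset == 0) = false := by simp; omega
    have hr : PySem.List.pyRange 0 offset 1 = [] :=
      PySem.List.pyRange_one_eq_nil (by omega)
    have ho : (if offset > 0 then offset else 0) = 0 := by simp; omega
    simp only [hne, hr, ho, Bool.false_eq_true, if_false, List.foldl_nil]
    have := po_zip sequence fillvalue 0
    simpa using this
  · subst heq
    simp only [beq_self_eq_true, if_true]
    have ho : ((0:Int) > 0) = False := by simp
    have := po_zip sequence fillvalue 0
    simpa using this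
  · have hne : (offset == 0) = false := by simp; omega
    have ho : (if offset > 0 then offset else 0) = offset := by simp [hgt]
    simp only [hne, Bool.false_eq_true, if_false, ho]
    rw [po_foldl]
    have hlen : (PySem.List.pyRange 0 offset 1).length = offset.toNat := by
      simp [PySem.List.length_pyRange_one]
    rw [hlen]
    exact po_zip sequence fillvalue offset.toNat
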